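-- pv_equiv track=rewrite | github.com/GianmarcoCarniglia/proyecto | main.py | ondulados
-- ===== SOURCE A (Python) =====
-- def ondulados(ci):
--
--         ondulado = True
--         contador = 0
--         par = list(str(ci))[0]
--         inpar = list(str(ci))[1]
--
--         if par == inpar:
--             print (f'The number {ci} is not an ondulated number.')
--         else:
--             for x in str(ci):
--                 if (contador+2)%2 == 0:
--                     if x != par:
--                         ondulado = False
--                     contador +=1
--                 elif (contador+2) %2 !=0:
--                     if x != inpar:
--                         ondulado = False
--                     contador += 1
--             if ondulado == True:
--                 return 0
--             else:
--                 return 1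
-- ===== SOURCE B (Python) =====
-- def ondulados(ci):
--     s = str(ci)
--     par = s[0]
--     inpar = s[1]
--     if par == inpar:
--         print(f'The number {ci} is not an ondulated number.')
--     else:
--         if set(s[::2]) == {par} and set(s[1::2]) == {inpar}:
--             return 0
--         else:
--             return 1
-- ===== Notes on version B (the rewrite author's own statement) =====
-- stated objective: simpler
-- what changed: replaced the parity-counter boolean-flag loop with two strided slices s[::2]/s[1::2] compared as sets against {par}/{inpar}
-- outside the precondition, e.g. on ondulados(0): A raises IndexError, B raises IndexError; on ondulados(9): A raises IndexError, B raises IndexError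
import Mathlib
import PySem

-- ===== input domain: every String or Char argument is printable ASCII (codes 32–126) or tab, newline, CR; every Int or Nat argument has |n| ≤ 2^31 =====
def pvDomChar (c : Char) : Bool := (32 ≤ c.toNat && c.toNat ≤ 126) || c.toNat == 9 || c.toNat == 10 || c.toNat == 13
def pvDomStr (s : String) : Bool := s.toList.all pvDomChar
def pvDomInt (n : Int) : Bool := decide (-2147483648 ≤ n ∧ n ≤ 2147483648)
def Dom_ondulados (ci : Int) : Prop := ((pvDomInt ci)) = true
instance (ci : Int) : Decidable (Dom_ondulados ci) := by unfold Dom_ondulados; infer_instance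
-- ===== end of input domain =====

-- B replaces A's parity-counter flag loop with two strided slices compared as sets (objective: simpler).
-- Pre_ excludes single-digit 0..9, on which A raises IndexError (str(ci)[1]); B raises there too.
-- B replaces A's parity-counter flag loop with two strided slices compared as sets (objective: simpler).
-- ===== PORT A =====
def ondulados (ci : Int) : Option Int :=
  let s := (PySem.Int.toStr ci).toList
  match PySem.List.pyGet? s 0, PySem.List.pyGet? s 1 with
  | some par, some inpar =>
    if par == inpar then
      none  -- print(...), falls off the end: returns None
    else
      let r := s.foldl (fun (st : Bool × Int) x =>
        if PySem.Int.mod (st.2 + 2) 2 == 0 then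
          ((if x != par then false else st.1), st.2 + 1)
        else if PySem.Int.mod (st.2 + 2) 2 != 0 then
          ((if x != inpar then false else st.1), st.2 + 1)
        else st) (true, 0)
      if r.1 = true then some 0 else some 1
  | _, _ => none  -- IndexError (outside Pre_)

-- ===== PORT B =====
def ondulados_alt (ci : Int) : Option Int :=
  let s := (PySem.Int.toStr ci).toList
  match PySem.List.pyGet? s 0 with
  | none => none  -- IndexError (outside Pre_)
  | some par =>
    match PySem.List.pyGet? s 1 with
    | none => none  -- IndexError (outside Pre_)
    | some inpar =>
      if par == inpar then
        none  -- print(...), falls off the end: returns None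
      else
        match PySem.List.slice? s none none 2 with
        | none => none  -- unreachable: step 2 ≠ 0
        | some ev =>
          match PySem.List.slice? s (some 1) none 2 with
          | none => none  -- unreachable: step 2 ≠ 0
          | some od =>
            if PySem.Set.equal (PySem.Set.ofList ev) (PySem.Set.ofList [par]) &&
               PySem.Set.equal (PySem.Set.ofList od) (PySem.Set.ofList [inpar]) then some 0 else some 1

-- ===== PRECONDITION & SPEC =====
-- Pre_ excludes exactly 0 ≤ ci ≤ 9: there str(ci) has a single character and A raises IndexError on str(ci)[1] (B raises it too).
def Pre_ondulados (ci : Int) : Prop := ¬ (0 ≤ ci ∧ ci ≤ 9)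
instance (ci : Int) : Decidable (Pre_ondulados ci) := by unfold Pre_ondulados; infer_instance
def pvWitness_ondulados : Int := 121
def Spec_ondulados (ci : Int) (out : Option Int) : Prop := out = ondulados_alt ci
instance (ci : Int) (out : Option Int) : Decidable (Spec_ondulados ci out) := by unfold Spec_ondulados; infer_instance

-- ===== CLAIM (what is proved, stated in full; the proofs are below) =====
def Claim_equal_ondulados : Prop := ∀ (ci : Int), Dom_ondulados ci → Pre_ondulados ci → Spec_ondulados ci (ondulados ci)

-- ===== LEMMAS AND PROOFS =====

-- elements at the even positions of a list
def pvEvens {α : Type} : List α → List α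
  | [] => []
  | [a] => [a]
  | a :: _ :: t => a :: pvEvens t

lemma pvEvensIdx {α : Type} (t : List α) :
    (List.range ((t.length + 1) / 2)).filterMap (fun k => t[2 * k]?) = pvEvens t := by
  match t with
  | [] => simp [pvEvens]
  | [a] => simp [pvEvens]
  | a :: b :: u =>
    have hc : (((a :: b :: u).length + 1) / 2) = (u.length + 1) / 2 + 1 := by
      simp; omega
    rw [hc, List.range_succ_eq_map, List.filterMap_cons]
    simp only [List.filterMap_map]
    have : (List.range ((u.length + 1) / 2)).filterMap
        ((fun k => (a :: b :: u)[2 * k]?) ∘ (fun k => k + 1))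
        = (List.range ((u.length + 1) / 2)).filterMap (fun k => u[2 * k]?) := by
      apply List.filterMap_congr
      intro k _
      simp [Function.comp]
      rw [show 2 * (k+1) = 2*k + 1 + 1 by ring]
      simp
    rw [this, pvEvensIdx u]
    simp [pvEvens]

lemma pvSlice2 {α : Type} (xs : List α) :
    PySem.List.slice? xs none none 2 = some (pvEvens xs) := by
  rw [← pvEvensIdx xs]
  simp only [PySem.List.slice?, PySem.List.sliceIndices]
  norm_num
  have h1 : (if 0 < xs.length then (((xs.length:Int) + 2 - 1) / 2).toNat else 0) = (xs.length + 1) / 2 := by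
    split <;> omega
  rw [h1]
  apply List.filterMap_congr
  intro k _
  congr 1


lemma pvSlice12 {α : Type} (xs : List α) :
    PySem.List.slice? xs (some 1) none 2 = some (pvEvens xs.tail) := by
  match xs with
  | [] => simp [PySem.List.slice?, PySem.List.sliceIndices, pvEvens]
  | a :: t =>
    rw [show (a :: t).tail = t from rfl, ← pvEvensIdx t]
    simp only [PySem.List.slice?, PySem.List.sliceIndices]
    norm_num
    have h1 : (if 0 < t.length then (((t.length:Int) + 2 - 1) / 2).toNat else 0) = (t.length + 1) / 2 := by
      split <;> omega
    rw [h1]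
    apply List.filterMap_congr
    intro k _
    rw [show (1 + 2 * (k:Int)).toNat = 2 * k + 1 by omega]
    simp

lemma pvSetEq (p : Char) (l : List Char) (h : l ≠ []) :
    PySem.Set.equal (PySem.Set.ofList l) (PySem.Set.ofList [p]) = l.all (fun x => x == p) := by
  rw [Bool.eq_iff_iff]
  simp only [PySem.Set.equal, PySem.Set.issubset, Bool.and_eq_true, List.all_eq_true,
    PySem.Set.mem_ofList, List.all_eq_true, beq_iff_eq]
  have hc : ∀ (m : List Char) (x : Char), ((PySem.Set.ofList m).contains x = true) ↔ x ∈ m := by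
    intro m x
    rw [PySem.Set.contains, List.contains_iff_mem, PySem.Set.mem_ofList]
  simp only [hc, List.mem_singleton]
  constructor
  · rintro ⟨h1, _⟩ x hx
    exact h1 x hx
  · intro hall
    obtain ⟨y, hy⟩ := List.exists_mem_of_ne_nil l h
    exact ⟨hall, fun x hx => hx ▸ (hall y hy ▸ hy)⟩

-- A's remaining alternation check after a prefix of even (e = true) or odd (e = false) length
def pvChk (par inpar : Char) : Bool → List Char → Bool
  | _, [] => true
  | e, x :: u => (if e then x == par else x == inpar) && pvChk par inpar (!e) u

lemma pvFoldA (par inpar : Char) (t : List Char) : ∀ (ond : Bool) (n : Nat),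
    t.foldl (fun (st : Bool × Int) x =>
        if PySem.Int.mod (st.2 + 2) 2 == 0 then
          ((if x != par then false else st.1), st.2 + 1)
        else if PySem.Int.mod (st.2 + 2) 2 != 0 then
          ((if x != inpar then false else st.1), st.2 + 1)
        else st) (ond, (n : Int))
      = (ond && pvChk par inpar (n % 2 == 0) t, (n : Int) + t.length) := by
  induction t with
  | nil => intro ond n; simp [pvChk]
  | cons x u ih =>
    intro ond n
    have hmod : PySem.Int.mod ((n : Int) + 2) 2 = ((n % 2 : Nat) : Int) := by
      rw [PySem.Int.mod, Int.fmod_eq_emod]; omega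
    rw [List.foldl_cons]
    have hcast : ((n : Int) + 1) = ((n + 1 : Nat) : Int) := by push_cast; ring
    by_cases hp : n % 2 = 0
    · have hcond : (PySem.Int.mod ((n : Int) + 2) 2 == 0) = true := by
        rw [hmod, hp]; rfl
      simp only [hcond, if_true]
      rw [hcast, ih _ (n + 1)]
      have he : ((n + 1) % 2 == 0) = false := by simp; omega
      have h2 : (n % 2 == 0) = true := by simp [hp]
      rw [he, h2]
      refine Prod.ext ?_ ?_
      · cases ond <;> cases hxp : x == par <;>
          simp [pvChk, bne, hxp]
      · simp only [List.length_cons]; push_cast; ring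
    · have hcond : (PySem.Int.mod ((n : Int) + 2) 2 == 0) = false := by
        rw [hmod]
        have : n % 2 = 1 := by omega
        rw [this]; rfl
      have hcond2 : (PySem.Int.mod ((n : Int) + 2) 2 != 0) = true := by
        rw [bne, hcond]; rfl
      simp only [hcond, hcond2, Bool.false_eq_true, if_false, if_true]
      rw [hcast, ih _ (n + 1)]
      have he : ((n + 1) % 2 == 0) = true := by simp; omega
      have h2 : (n % 2 == 0) = false := by simp [hp]
      rw [he, h2]
      refine Prod.ext ?_ ?_
      · cases ond <;> cases hxp : x == inpar <;>
          simp [pvChk, bne, hxp]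
      · simp only [List.length_cons]; push_cast; ring

lemma pvEvens_cons {α : Type} (a : α) (t : List α) : pvEvens (a :: t) = a :: pvEvens t.tail := by
  cases t <;> simp [pvEvens]

lemma pvChk_eq (par inpar : Char) (t : List Char) : ∀ (e : Bool),
    pvChk par inpar e t
      = ((pvEvens t).all (fun x => x == (if e then par else inpar)) &&
         (pvEvens t.tail).all (fun x => x == (if e then inpar else par))) := by
  induction t with
  | nil => intro e; simp [pvChk, pvEvens]
  | cons x u ih =>
    intro e
    rw [pvChk, ih (!e), pvEvens_cons]
    cases hu : u with
    | nil => cases e <;> simp [pvEvens]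
    | cons y v =>
      simp only [List.tail_cons, List.all_cons]
      cases e <;> simp [Bool.and_assoc, Bool.and_comm, Bool.and_left_comm]

lemma pvMain (ci : Int) : ondulados ci = ondulados_alt ci := by
  unfold ondulados ondulados_alt
  simp only []
  generalize (PySem.Int.toStr ci).toList = s
  match s with
  | [] => rfl
  | [a] => rfl
  | a :: b :: t =>
    have h0 : PySem.List.pyGet? (a :: b :: t) 0 = some a := PySem.List.pyGet?_zero_cons _ _
    have h1 : PySem.List.pyGet? (a :: b :: t) 1 = some b := by
      rw [show (1 : Int) = ((0 : Nat) : Int) + 1 by norm_num, PySem.List.pyGet?_cons_succ,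
        PySem.List.pyGet?_natCast]
      rfl
    rw [h0, h1]
    cases hab : a == b with
    | true => simp only [hab, if_true]
    | false =>
      simp only [hab, Bool.false_eq_true, if_false]
      simp only [pvSlice2, pvSlice12]
      have hf := pvFoldA a b (a :: b :: t) true 0
      rw [show ((0 : Nat) : Int) = (0 : Int) by norm_num] at hf
      rw [hf]
      have hne1 : pvEvens (a :: b :: t) ≠ [] := by rw [pvEvens_cons]; simp
      have hne2 : pvEvens (a :: b :: t).tail ≠ [] := by
        rw [List.tail_cons, pvEvens_cons]; simp
      rw [pvSetEq a _ hne1, pvSetEq b _ hne2]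
      rw [show ((0 % 2 : Nat) == 0) = true from rfl, pvChk_eq a b (a :: b :: t) true]
      simp only [Bool.true_and, if_true]

-- ===== VERDICT (by name: the statement is the Claim_ definition above) =====
theorem ondulados_spec : Claim_equal_ondulados := by
  intro ci _ _
  unfold Spec_ondulados
  exact pvMain ci
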